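-- pv_equiv track=rewrite | github.com/shodenis/hermes-agent | extensions/hermes_spare24/deal_draft_processor.py | _deal_title_product_segment
-- ===== SOURCE A (Python) =====
-- from typing import Any, Awaitable, Callable, Dict, List, Literal, Optional, Tuple
--
-- def _deal_title_product_segment(data: Dict[str, Any]) -> str:
--     """Product line for deal title: brands + position count (no client)."""
--     items = data.get("items") if isinstance(data.get("items"), list) else []
--     n = len(items)
--     brands: List[str] = []
--     for it in items:
--         if isinstance(it, dict):
--             b = str(it.get("brand") or "").strip()
--             if b:
--                 brands.append(b)
--     uniq = sorted(set(brands))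
--     if not uniq:
--         return f"Заявка — {n} поз."
--     if len(uniq) == 1:
--         return f"{uniq[0]} — {n} поз."
--     return f"{uniq[0]} + др. — {n} поз."
-- ===== SOURCE B (Python) =====
-- def _deal_title_product_segment(data):
--     """Product line for deal title: brands + position count (no client)."""
--     items = data.get("items") if isinstance(data.get("items"), list) else []
--     n = len(items)
--     min_brand = None
--     first = None
--     multiple = False
--     for it in items:
--         if isinstance(it, dict):
--             b = str(it.get("brand") or "").strip()
--             if b:
--                 if min_brand is None:
--                     min_brand = b
--                     first = b
--                 else:
--                     if b < min_brand:
--                         min_brand = b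
--                     if b != first:
--                         multiple = True
--     if min_brand is None:
--         return f"Заявка — {n} поз."
--     if not multiple:
--         return f"{min_brand} — {n} поз."
--     return f"{min_brand} + др. — {n} поз."
-- ===== Notes on version B (the rewrite author's own statement) =====
-- stated objective: alternative
-- what changed: Replaced A's collect-brands-into-a-list, build a set, sort it and inspect its head/length by a single pass over the items that maintains a running minimum brand, the first brand seen and a boolean 'multiple distinct brands' flag, so no set and no sort are built.
import Mathlib
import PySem

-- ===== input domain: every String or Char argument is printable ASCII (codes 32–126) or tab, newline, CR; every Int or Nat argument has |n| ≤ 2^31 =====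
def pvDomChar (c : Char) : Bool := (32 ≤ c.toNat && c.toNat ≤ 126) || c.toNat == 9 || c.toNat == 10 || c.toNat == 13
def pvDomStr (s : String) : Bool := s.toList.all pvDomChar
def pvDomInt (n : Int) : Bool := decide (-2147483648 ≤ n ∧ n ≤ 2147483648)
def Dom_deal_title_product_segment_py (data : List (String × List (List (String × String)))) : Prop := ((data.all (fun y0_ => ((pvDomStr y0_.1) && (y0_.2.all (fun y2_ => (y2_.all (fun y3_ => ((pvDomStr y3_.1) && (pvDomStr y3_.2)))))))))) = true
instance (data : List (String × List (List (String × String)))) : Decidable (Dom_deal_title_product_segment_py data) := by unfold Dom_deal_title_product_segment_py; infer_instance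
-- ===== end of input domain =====

-- B replaces A's build-brand-list → set → sort pipeline by a single pass over the items that
-- keeps a running minimum brand, the first brand seen and a "multiple brands" flag (alternative
-- decomposition, same asymptotic cost).


-- ===== PORT A =====
-- b = str(it.get("brand") or "").strip()   (shared by both ports; 'x or ""' maps None and "" to "")
def pvBrandOf (it : List (String × String)) : String :=
  PySem.Str.strip (((PySem.Dict.mk it).get? "brand").getD "")

def deal_title_product_segment_py (data : List (String × List (List (String × String)))) : String :=
  let items := ((PySem.Dict.mk data).get? "items").getD []
  let n := items.length
  let brands : List String := items.foldl (fun acc it =>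
      let b := pvBrandOf it
      if b ≠ "" then acc ++ [b] else acc) []
  let uniq := PySem.List.sorted (PySem.Set.ofList brands) (fun x => x) false
  if uniq = [] then
    "Заявка — " ++ PySem.Int.toStr (n : Int) ++ " поз."
  else if uniq.length = 1 then
    PySem.List.pyGetD uniq 0 "" ++ " — " ++ PySem.Int.toStr (n : Int) ++ " поз."
  else
    PySem.List.pyGetD uniq 0 "" ++ " + др. — " ++ PySem.Int.toStr (n : Int) ++ " поз."

-- ===== PORT B =====
-- loop state: none = no brand seen yet; some (min_brand, first, multiple)
def pvStep (st : Option (String × String × Bool)) (b : String) : Option (String × String × Bool) :=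
  match st with
  | none => some (b, b, false)
  | some (mn, fst, mult) => some (if b < mn then b else mn, fst, mult || (b != fst))

def deal_title_product_segment_py_alt (data : List (String × List (List (String × String)))) : String :=
  let items := ((PySem.Dict.mk data).get? "items").getD []
  let n := items.length
  let st : Option (String × String × Bool) := items.foldl (fun st it =>
      let b := pvBrandOf it
      if b = "" then st else pvStep st b) none
  match st with
  | none => "Заявка — " ++ PySem.Int.toStr (n : Int) ++ " поз."
  | some (mn, _, mult) =>
      if mult = false then mn ++ " — " ++ PySem.Int.toStr (n : Int) ++ " поз."
      else mn ++ " + др. — " ++ PySem.Int.toStr (n : Int) ++ " поз."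

-- ===== PRECONDITION & SPEC =====
def Spec_deal_title_product_segment_py (data : List (String × List (List (String × String)))) (out : String) : Prop := out = deal_title_product_segment_py_alt data
instance (data : List (String × List (List (String × String)))) (out : String) : Decidable (Spec_deal_title_product_segment_py data out) := by unfold Spec_deal_title_product_segment_py; infer_instance

-- ===== CLAIM (what is proved, stated in full; the proofs are below) =====
def Claim_equal_deal_title_product_segment_py : Prop := ∀ (data : List (String × List (List (String × String)))), Dom_deal_title_product_segment_py data → Spec_deal_title_product_segment_py data (deal_title_product_segment_py data)

-- ===== LEMMAS AND PROOFS =====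

-- A's brand-collecting loop is the filtered map of pvBrandOf over the items
lemma brands_eq (items : List (List (String × String))) :
    items.foldl (fun acc it =>
      let b := pvBrandOf it
      if b ≠ "" then acc ++ [b] else acc) []
    = (items.filter (fun it => pvBrandOf it ≠ "")).map pvBrandOf := by
  have := PySem.List.foldl_append_if (fun it => decide (pvBrandOf it ≠ "")) pvBrandOf items []
  simpa using this

-- B's loop folds pvStep over exactly that brand list
lemma alt_fold_eq (items : List (List (String × String))) (st : Option (String × String × Bool)) :
    items.foldl (fun st it =>
      let b := pvBrandOf it
      if b = "" then st else pvStep st b) st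
      = ((items.filter (fun it => pvBrandOf it ≠ "")).map pvBrandOf).foldl pvStep st := by
  induction items generalizing st with
  | nil => rfl
  | cons it rest ih =>
      by_cases h : pvBrandOf it = "" <;> simp [h, ih]

-- closed form of folding pvStep from a some-state
lemma fold_step_some (rest : List String) (mn fst : String) (mult : Bool) :
    rest.foldl pvStep (some (mn, fst, mult))
      = some (rest.foldl min mn, fst, mult || rest.any (· != fst)) := by
  induction rest generalizing mn mult with
  | nil => simp
  | cons x t ih =>
      have hmin : (if x < mn then x else mn) = min mn x := by
        rcases lt_or_ge x mn with h | h
        · simp [h, min_eq_right (le_of_lt h)]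
        · simp [not_lt.2 h, min_eq_left h]
      simp only [List.foldl_cons, pvStep, ih, List.any_cons, hmin, Bool.or_assoc]

lemma foldl_min_eq_of_all_eq (rest : List String) (b : String) (h : ∀ x ∈ rest, x = b) :
    rest.foldl min b = b := by
  induction rest with
  | nil => rfl
  | cons x t ih =>
      have hx := h x (by simp)
      simp only [List.foldl_cons, hx, min_self]
      exact ih (fun y hy => h y (by simp [hy]))

lemma ofList_all_eq (rest : List String) (b : String) (h : ∀ x ∈ rest, x = b) :
    PySem.Set.ofList (b :: rest) = [b] := by
  have : ∀ (l : List String), (∀ x ∈ l, x = b) → l.foldl PySem.Set.add [b] = [b] := by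
    intro l hl
    induction l with
    | nil => rfl
    | cons x t ih =>
        have hx := hl x (by simp)
        simp only [List.foldl_cons, hx, PySem.Set.add_of_mem (by simp : b ∈ [b])]
        exact ih (fun y hy => hl y (by simp [hy]))
  simpa [PySem.Set.ofList, PySem.Set.add] using this rest h

-- the head of sorted(set(brands)) is the running minimum of the brands
lemma sorted_head_eq_min (b : String) (rest : List String) {m : String} {t : List String}
    (hs : PySem.List.sorted (PySem.Set.ofList (b :: rest)) (fun x => x) false = m :: t) :
    m = rest.foldl min b := by
  have hmin : PySem.List.min? (b :: rest) (fun y => y) = some (rest.foldl min b) :=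
    PySem.List.min?_id_cons b rest
  have hMmem : rest.foldl min b ∈ b :: rest := PySem.List.min?_mem hmin
  have hMlow := PySem.List.min?_isMin hmin
  have hmlow := PySem.List.key_head_sorted_le _ _ hs
  have hmmem : m ∈ b :: rest := by
    have : m ∈ PySem.List.sorted (PySem.Set.ofList (b :: rest)) (fun x => x) false := by
      rw [hs]; simp
    rw [PySem.List.mem_sorted, PySem.Set.mem_ofList] at this
    exact this
  exact le_antisymm (hmlow _ (by rw [PySem.Set.mem_ofList]; exact hMmem)) (hMlow _ hmmem)

-- len(set(brands)) == 1 says exactly that every brand equals the first one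
lemma ofList_len_one_iff (b : String) (rest : List String) :
    (PySem.Set.ofList (b :: rest)).length = 1 ↔ ∀ x ∈ rest, x = b := by
  constructor
  · intro h1 x hx
    obtain ⟨c, hc⟩ : ∃ c, PySem.Set.ofList (b :: rest) = [c] := by
      match hL : PySem.Set.ofList (b :: rest) with
      | [c] => exact ⟨c, rfl⟩
      | [] => rw [hL] at h1; simp at h1
      | c :: d :: l => rw [hL] at h1; simp at h1
    have hb : b ∈ PySem.Set.ofList (b :: rest) := by rw [PySem.Set.mem_ofList]; simp
    have hx' : x ∈ PySem.Set.ofList (b :: rest) := by rw [PySem.Set.mem_ofList]; simp [hx]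
    rw [hc] at hb hx'; simp at hb hx'; rw [hx', hb]
  · intro h
    rw [ofList_all_eq rest b h]; rfl

-- ===== VERDICT (by name: the statement is the Claim_ definition above) =====
theorem deal_title_product_segment_py_spec : Claim_equal_deal_title_product_segment_py := by
  intro data _
  unfold Spec_deal_title_product_segment_py deal_title_product_segment_py deal_title_product_segment_py_alt
  simp only [brands_eq, alt_fold_eq]
  generalize ((((PySem.Dict.mk data).get? "items").getD []) : List (List (String × String))) = items
  generalize (items.filter (fun it => pvBrandOf it ≠ "")).map pvBrandOf = bl
  match bl with
  | [] => simp [PySem.Set.ofList, PySem.List.sorted]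
  | b :: rest =>
    have hne : PySem.Set.ofList (b :: rest) ≠ [] := by
      intro h
      have : b ∈ PySem.Set.ofList (b :: rest) := by rw [PySem.Set.mem_ofList]; simp
      rw [h] at this; simp at this
    have hsne : PySem.List.sorted (PySem.Set.ofList (b :: rest)) (fun x => x) false ≠ [] := by
      rw [Ne, PySem.List.sorted_eq_nil_iff]; exact hne
    rw [List.foldl_cons]
    show _ = (match rest.foldl pvStep (pvStep none b) with
      | none => "Заявка — " ++ PySem.Int.toStr (items.length : Int) ++ " поз."
      | some (mn, _, mult) =>
          if mult = false then mn ++ " — " ++ PySem.Int.toStr (items.length : Int) ++ " поз."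
          else mn ++ " + др. — " ++ PySem.Int.toStr (items.length : Int) ++ " поз.")
    rw [show pvStep none b = some (b, b, false) from rfl, fold_step_some]
    simp only [if_neg hsne, Bool.false_or]
    by_cases hall : ∀ x ∈ rest, x = b
    · have h1 : (PySem.List.sorted (PySem.Set.ofList (b :: rest)) (fun x => x) false) = [b] := by
        rw [ofList_all_eq rest b hall]; rfl
      have hany : rest.any (· != b) = false := by
        simp only [List.any_eq_false]; intro x hx; simpa using hall x hx
      rw [h1, foldl_min_eq_of_all_eq rest b hall, hany]
      simp [PySem.List.pyGetD_zero_cons]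
    · have hlen : (PySem.List.sorted (PySem.Set.ofList (b :: rest)) (fun x => x) false).length ≠ 1 := by
        rw [PySem.List.length_sorted, Ne, ofList_len_one_iff]; exact hall
      obtain ⟨m, t, hs⟩ : ∃ m t, PySem.List.sorted (PySem.Set.ofList (b :: rest)) (fun x => x) false = m :: t := by
        match h : PySem.List.sorted (PySem.Set.ofList (b :: rest)) (fun x => x) false with
        | [] => exact absurd h hsne
        | m :: t => exact ⟨m, t, rfl⟩
      have hany : rest.any (· != b) = true := by
        simp only [not_forall] at hall
        obtain ⟨x, hx, hxb⟩ := hall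
        simp only [List.any_eq_true]; exact ⟨x, hx, by simpa using hxb⟩
      rw [hs] at hlen ⊢
      rw [hany]
      simp [PySem.List.pyGetD_zero_cons, sorted_head_eq_min b rest hs]
      intro h
      exact hlen (by simp [h])
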